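-- pv_equiv track=rewrite | github.com/juntaic7/CoT-with-Supervision | DCF/equal_number/dataset_generation.py | generate_valid_string
-- ===== SOURCE A (Python) =====
-- def generate_valid_string(length:int) -> str:
--     """Generate a valid string of a given length."""
--     if length % 2 != 0:
--         raise ValueError("Length must be even to balance 0s and 1s.")
--
--     string = []
--     count_0, count_1 = 0, 0
--
--     for _ in range(length):
--         remaining = length - len(string)  # Remaining slots to fill
--         if count_0 == count_1:
--             # Must add 0 to maintain the prefix constraint
--             string.append('0')
--             count_0 += 1
--         elif count_0 < length // 2 and (remaining - 1 >= (length // 2 - count_1)):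
--             # Add 0 if it won't prevent balancing
--             string.append('0')
--             count_0 += 1
--         else:
--             # Add 1 if adding more 0s would make balancing impossible
--             string.append('1')
--             count_1 += 1
--
--     return ''.join(string)
-- ===== SOURCE B (Python) =====
-- def generate_valid_string(length: int) -> str:
--     """Generate a valid string of a given length."""
--     if length % 2 != 0:
--         raise ValueError("Length must be even to balance 0s and 1s.")
--     half = length // 2
--     return '0' * half + '1' * half
-- ===== Notes on version B (the rewrite author's own statement) =====
-- stated objective: simpler
-- what changed: Replaced the per-slot loop with counters and a feasibility test by the closed form '0'*(length//2) + '1'*(length//2), which is the string the loop always produces.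
import Mathlib
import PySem

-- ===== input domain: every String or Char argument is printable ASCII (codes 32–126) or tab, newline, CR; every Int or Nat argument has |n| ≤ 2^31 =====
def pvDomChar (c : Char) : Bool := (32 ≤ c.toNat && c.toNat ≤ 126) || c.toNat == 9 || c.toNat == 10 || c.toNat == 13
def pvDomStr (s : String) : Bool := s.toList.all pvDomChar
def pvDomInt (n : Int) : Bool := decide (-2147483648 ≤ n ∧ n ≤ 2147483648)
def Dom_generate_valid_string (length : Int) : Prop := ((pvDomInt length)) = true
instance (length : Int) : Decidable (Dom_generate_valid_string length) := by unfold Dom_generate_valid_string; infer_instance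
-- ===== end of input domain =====

-- B replaces the per-slot loop with the closed form '0'*(length//2) + '1'*(length//2) (simpler).

-- ===== PORT A =====
-- one loop iteration of A's for-loop (state: string, count_0, count_1)
def gvsStep (length : Int) (st : List Char × Int × Int) : List Char × Int × Int :=
  let string := st.1
  let c0 := st.2.1
  let c1 := st.2.2
  let remaining : Int := length - (string.length : Int)
  if c0 = c1 then (string ++ ['0'], c0 + 1, c1)
  else if c0 < PySem.Int.floordiv length 2 ∧ remaining - 1 ≥ PySem.Int.floordiv length 2 - c1 then
    (string ++ ['0'], c0 + 1, c1)
  else (string ++ ['1'], c0, c1 + 1)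

def generate_valid_string (length : Int) : String :=
  if PySem.Int.mod length 2 ≠ 0 then ""  -- A raises ValueError here; excluded by Pre_
  else
    let final := (PySem.List.pyRange 0 length 1).foldl (fun st _ => gvsStep length st) ([], 0, 0)
    String.mk final.1

-- ===== PORT B =====
def generate_valid_string_alt (length : Int) : String :=
  if PySem.Int.mod length 2 ≠ 0 then ""  -- B raises ValueError here; excluded by Pre_
  else
    let half := PySem.Int.floordiv length 2
    String.mk (List.replicate half.toNat '0' ++ List.replicate half.toNat '1')

-- ===== PRECONDITION & SPEC =====
-- A (and B) raise ValueError on odd length; exactly those inputs are excluded.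
def Pre_generate_valid_string (length : Int) : Prop := PySem.Int.mod length 2 = 0
instance (length : Int) : Decidable (Pre_generate_valid_string length) := by
  unfold Pre_generate_valid_string; infer_instance
def pvWitness_generate_valid_string : Int := (4)

def Spec_generate_valid_string (length : Int) (out : String) : Prop := out = generate_valid_string_alt length
instance (length : Int) (out : String) : Decidable (Spec_generate_valid_string length out) := by unfold Spec_generate_valid_string; infer_instance

-- ===== CLAIM (what is proved, stated in full; the proofs are below) =====
def Claim_equal_generate_valid_string : Prop := ∀ (length : Int), Dom_generate_valid_string length → Pre_generate_valid_string length → Spec_generate_valid_string length (generate_valid_string length)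

-- ===== LEMMAS AND PROOFS =====

-- a fold that ignores the list elements is an iterate of the step
lemma gvs_foldl_iterate {α β : Type} (f : α → α) :
    ∀ (l : List β) (st : α), l.foldl (fun s _ => f s) st = f^[l.length] st := by
  intro l
  induction l with
  | nil => intro st; simp
  | cons a t ih =>
      intro st
      simp [List.foldl, ih, Function.iterate_succ_apply]

-- the state of A's loop after k of 2*h iterations, in closed form
lemma gvs_state_spec (h : Nat) (k : Nat) (hk : k ≤ 2 * h) :
    (gvsStep ((2 * h : Nat) : Int))^[k] ([], 0, 0) =
      (List.replicate (min k h) '0' ++ List.replicate (k - h) '1',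
       ((min k h : Nat) : Int), ((k - h : Nat) : Int)) := by
  induction k with
  | zero => simp
  | succ k ih =>
      have hk' : k ≤ 2 * h := by omega
      have hfd : PySem.Int.floordiv ((2 * h : Nat) : Int) 2 = ((h : Nat) : Int) := by
        have := PySem.Int.floordiv_natCast (2 * h) 2
        simpa [Nat.mul_div_cancel_left h (by norm_num : 0 < 2)] using this
      rw [Function.iterate_succ_apply', ih hk']
      simp only [gvsStep, hfd]
      by_cases hkh : k < h
      · -- first half: counts equal only when k = 0, else the feasibility branch adds '0'
        have hmin : min k h = k := by omega
        have hsub : k - h = 0 := by omega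
        have hmin' : min (k + 1) h = k + 1 := by omega
        have hsub' : k + 1 - h = 0 := by omega
        rw [hmin, hsub, hmin', hsub']
        by_cases h0 : k = 0
        · subst h0; simp
        · rw [if_neg (show ((k : Nat) : Int) ≠ ((0 : Nat) : Int) by exact_mod_cast h0)]
          rw [if_pos (by
            refine ⟨by exact_mod_cast hkh, ?_⟩
            simp only [List.length_append, List.length_replicate]
            push_cast
            omega)]
          simp only [Prod.mk.injEq, List.replicate_succ' (n := k), List.replicate_zero,
            List.append_nil]
          exact ⟨trivial, by push_cast; omega, trivial⟩
      · -- second half: both 0-branches fail, a '1' is appended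
        have hmin : min k h = h := by omega
        have hmin' : min (k + 1) h = h := by omega
        rw [hmin, hmin']
        rw [if_neg (show ((h : Nat) : Int) ≠ ((k - h : Nat) : Int) by
          exact_mod_cast (show h ≠ k - h by omega))]
        rw [if_neg (by intro hc; exact absurd hc.1 (lt_irrefl _))]
        have hrw : k + 1 - h = (k - h) + 1 := by omega
        rw [hrw, List.replicate_succ' (n := k - h)]
        simp only [Prod.mk.injEq, List.append_assoc]
        exact ⟨trivial, trivial, by push_cast; omega⟩

-- ===== VERDICT (by name: the statement is the Claim_ definition above) =====
theorem generate_valid_string_spec : Claim_equal_generate_valid_string := by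
  intro length _ hpre
  have hpre' : PySem.Int.mod length 2 = 0 := hpre
  unfold Spec_generate_valid_string generate_valid_string generate_valid_string_alt
  rw [if_neg (not_not_intro hpre'), if_neg (not_not_intro hpre')]
  by_cases hneg : length ≤ 0
  · -- empty range on A's side, empty replicates on B's side
    have hr : PySem.List.pyRange 0 length 1 = [] := by
      rw [PySem.List.pyRange_one]
      rw [show (length - 0).toNat = 0 from by omega]
      simp
    have hfd : PySem.Int.floordiv length 2 < 1 :=
      (PySem.Int.floordiv_lt_iff_lt_mul (a := length) (b := 2) (q := 1) (by norm_num)).mpr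
        (by omega)
    have hfd0 : (PySem.Int.floordiv length 2).toNat = 0 := by omega
    simp only [hr, List.foldl_nil, hfd0, List.replicate_zero, List.append_nil]
  · -- length = 2*h for a Nat h
    have hdvd : (2 : Int) ∣ length := (PySem.Int.mod_eq_zero_iff_dvd length 2).mp hpre'
    obtain ⟨m, hm⟩ := hdvd
    have hm0 : 0 ≤ m := by omega
    obtain ⟨h, rfl⟩ : ∃ h : Nat, m = (h : Int) := ⟨m.toNat, by omega⟩
    have hlen : length = ((2 * h : Nat) : Int) := by push_cast; omega
    subst hlen
    rw [gvs_foldl_iterate (gvsStep ((2 * h : Nat) : Int))]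
    rw [show (PySem.List.pyRange 0 ((2 * h : Nat) : Int) 1).length = 2 * h from by
      rw [PySem.List.length_pyRange_one]; omega]
    rw [gvs_state_spec h (2 * h) (le_refl _)]
    have hfd : PySem.Int.floordiv ((2 * h : Nat) : Int) 2 = ((h : Nat) : Int) := by
      have := PySem.Int.floordiv_natCast (2 * h) 2
      simpa [Nat.mul_div_cancel_left h (by norm_num : 0 < 2)] using this
    have hmin : min (2 * h) h = h := by omega
    have hsub : 2 * h - h = h := by omega
    simp [hfd, hmin, hsub]
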